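-- pv_equiv track=rewrite | github.com/allee15/CSS112_LFA | proiect5_LFA_ex2/cfg_reduction_engine.py | removeVariableInAllCombinations
-- ===== SOURCE A (Python) =====
-- def removeVariableInAllCombinations(str, substr):
--
--     # de exemplu  removeVariableInAllCombinations('ABAC', 'A')
--     #  va rezulta in lista ['ABAC', 'BAC', 'ABC', 'BC']
--
--
--     result = []
--     count = str.count(substr)
--
--     nr_posibilitati = 2 ** count
--
--     for current_pos in range(nr_posibilitati + 1):
--         current_str_val = ""
--         current_layout = bin(current_pos)[2:].zfill(len(str))
--         # Trecem prin fiecare pozitie ce contine substr si vedem daca ar trebui pus sau nu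
--         nr_substr = 0
--         for i in range(len(str)):
--             if str[i] == substr:
--                 if current_layout[len(current_layout) - nr_substr - 1] == '1':
--                     # Atunci eliminam aparitia
--                     pass
--                 else:
--                     # Altfel adaugam litera curenta
--                     current_str_val += str[i]
--
--                 nr_substr += 1
--
--             else:
--                 # Altfel adaugam litera curenta, orice ar fi ea
--                 current_str_val += str[i]
--
--
--         result.append(current_str_val)
--
--     return list(set(result))
-- ===== SOURCE B (Python) =====
-- def removeVariableInAllCombinations(str, substr):
--     # Incremental subset generation: fold over the characters, branching
--     # (keep / drop) at every character equal to substr.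
--     parts = ['']
--     for c in str:
--         if c == substr:
--             parts = [p + c for p in parts] + parts
--         else:
--             parts = [p + c for p in parts]
--     return list(set(parts))
-- ===== Notes on version B (the rewrite author's own statement) =====
-- stated objective: simpler
-- what changed: Replaces A's enumeration of 2^count+1 binary masks (bin()/zfill() string decoding with an occurrence counter per mask) by a single left-to-right fold that keeps a list of partial variants and branches keep/drop at each character equal to substr, deduplicating once at the end.
import Mathlib
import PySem

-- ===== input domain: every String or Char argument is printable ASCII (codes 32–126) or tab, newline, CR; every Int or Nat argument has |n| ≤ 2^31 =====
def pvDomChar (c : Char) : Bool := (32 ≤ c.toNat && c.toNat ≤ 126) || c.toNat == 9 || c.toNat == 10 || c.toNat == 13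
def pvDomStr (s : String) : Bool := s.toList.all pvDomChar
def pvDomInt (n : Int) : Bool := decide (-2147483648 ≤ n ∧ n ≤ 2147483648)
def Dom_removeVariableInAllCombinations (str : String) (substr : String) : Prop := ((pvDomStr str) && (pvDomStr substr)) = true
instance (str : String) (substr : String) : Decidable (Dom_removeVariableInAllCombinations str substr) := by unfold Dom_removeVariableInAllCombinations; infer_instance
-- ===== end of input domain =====

-- B replaces A's binary-mask enumeration (bin/zfill string decoding per mask) by an incremental
-- keep/drop fold over the characters; objective: simpler (not faster).


-- ===== PORT A =====
-- list(set(result)) is ported as PySem.Set.ofList result (Python's hash iteration order is not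
-- modelled; the result is compared as a set). The layout index len(layout)-nr_substr-1 is always
-- in range, ported exactly with pyGetD.
def removeVariableInAllCombinations (str : String) (substr : String) : List String :=
  let count := PySem.Str.count str substr
  let nr_posibilitati : Int := 2 ^ count
  let result := (PySem.List.pyRange 0 (nr_posibilitati + 1) 1).foldl
    (fun result current_pos =>
      let current_layout := PySem.Chars.zfill
        (PySem.List.slice (PySem.Int.toBinChars0b current_pos) (some 2) none) (PySem.Str.len str)
      let st := str.toList.foldl
        (fun (st : List Char × Nat) ci =>
          if String.ofList [ci] = substr then
            (if PySem.List.pyGetD current_layout ((current_layout.length : Int) - st.2 - 1) '0' = '1'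
             then st.1 else st.1 ++ [ci], st.2 + 1)
          else (st.1 ++ [ci], st.2))
        ([], 0)
      result ++ [String.ofList st.1])
    []
  PySem.Set.ofList result

-- ===== PORT B =====
def removeVariableInAllCombinations_alt (str : String) (substr : String) : List String :=
  let parts := str.toList.foldl
    (fun (parts : List (List Char)) c =>
      if String.ofList [c] = substr then parts.map (· ++ [c]) ++ parts
      else parts.map (· ++ [c]))
    [[]]
  PySem.Set.ofList (parts.map String.ofList)

-- ===== PRECONDITION & SPEC =====
def Spec_removeVariableInAllCombinations (str : String) (substr : String) (out : List String) : Prop := out = removeVariableInAllCombinations_alt str substr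
instance (str : String) (substr : String) (out : List String) : Decidable (Spec_removeVariableInAllCombinations str substr out) := by unfold Spec_removeVariableInAllCombinations; infer_instance

-- ===== CLAIM (what is proved, stated in full; the proofs are below) =====
def Claim_equal_removeVariableInAllCombinations : Prop := ∀ (str : String) (substr : String), Dom_removeVariableInAllCombinations str substr → Spec_removeVariableInAllCombinations str substr (removeVariableInAllCombinations str substr)

-- ===== LEMMAS AND PROOFS =====

-- the binary digit list of n (MSB first), as Nat.toDigits 2 computes it
def pvMyBin (n : Nat) : List Char :=
  if _h : n < 2 then [Nat.digitChar n] else pvMyBin (n / 2) ++ [Nat.digitChar (n % 2)]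
decreasing_by exact Nat.div_lt_self (by omega) (by omega)

theorem pvToDigitsCore_eq (f : Nat) : ∀ (n : Nat) (acc : List Char), n < f →
    Nat.toDigitsCore 2 f n acc = pvMyBin n ++ acc := by
  induction f with
  | zero => omega
  | succ f ih =>
    intro n acc hn
    rw [Nat.toDigitsCore]
    by_cases h2 : n / 2 = 0
    · rw [if_pos h2, pvMyBin, dif_pos (by omega)]
      have : n % 2 = n := Nat.mod_eq_of_lt (by omega)
      simp [this]
    · have hlt : n / 2 < f := by omega
      rw [if_neg h2, ih (n / 2) _ hlt]
      conv_rhs => rw [pvMyBin]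
      rw [dif_neg (show ¬ n < 2 by omega)]
      simp

theorem pvToDigits_eq (n : Nat) : Nat.toDigits 2 n = pvMyBin n := by
  rw [Nat.toDigits, pvToDigitsCore_eq (n + 1) n [] (by omega), List.append_nil]

theorem pvMyBin_mem (n : Nat) : ∀ c ∈ pvMyBin n, c = '0' ∨ c = '1' := by
  induction n using Nat.strong_induction_on with
  | _ n ih =>
    intro c hc
    rw [pvMyBin] at hc
    by_cases h : n < 2
    · rw [dif_pos h] at hc
      simp at hc; subst hc
      interval_cases n <;> simp [Nat.digitChar]
    · rw [dif_neg h] at hc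
      rcases List.mem_append.mp hc with h1 | h1
      · exact ih (n / 2) (Nat.div_lt_self (by omega) (by omega)) c h1
      · simp at h1; subst h1
        rcases Nat.mod_two_eq_zero_or_one n with h2 | h2 <;> simp [h2, Nat.digitChar]

theorem pvMyBin_ne_nil (n : Nat) : pvMyBin n ≠ [] := by
  rw [pvMyBin]; split <;> simp

theorem pvMyBin_lt (n : Nat) : n < 2 ^ (pvMyBin n).length := by
  induction n using Nat.strong_induction_on with
  | _ n ih =>
    rw [pvMyBin]
    by_cases h : n < 2
    · rw [dif_pos h]; simpa using h
    · rw [dif_neg h]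
      have := ih (n / 2) (Nat.div_lt_self (by omega) (by omega))
      simp only [List.length_append, List.length_cons, List.length_nil]
      have : n / 2 * 2 < 2 ^ (pvMyBin (n / 2)).length * 2 := by omega
      calc n < n / 2 * 2 + 2 := by omega
        _ ≤ 2 ^ (pvMyBin (n / 2)).length * 2 := by omega
        _ = 2 ^ ((pvMyBin (n / 2)).length + (0 + 1)) := by ring

theorem pvMyBin_getD (n : Nat) : ∀ k, k < (pvMyBin n).length →
    (pvMyBin n).getD ((pvMyBin n).length - 1 - k) '0' = if n.testBit k then '1' else '0' := by
  induction n using Nat.strong_induction_on with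
  | _ n ih =>
    intro k hk
    by_cases h : n < 2
    · rw [pvMyBin, dif_pos h] at hk ⊢
      simp at hk; subst hk
      interval_cases n <;> simp [Nat.digitChar, Nat.testBit]
    · rw [pvMyBin, dif_neg h] at hk ⊢
      simp only [List.length_append, List.length_cons, List.length_nil] at hk ⊢
      set L := (pvMyBin (n / 2)).length with hL
      have hLpos : 0 < L := by
        have := pvMyBin_ne_nil (n / 2)
        cases hE : pvMyBin (n / 2) with
        | nil => exact absurd hE this
        | cons a t => simp [hL, hE]
      cases k with
      | zero =>
        have : L + (0 + 1) - 1 - 0 = L := by omega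
        rw [this, List.getD_append_right _ _ _ _ (by omega), Nat.sub_self]
        simp only [List.getD]
        rcases Nat.mod_two_eq_zero_or_one n with h2 | h2 <;>
          simp [h2, Nat.digitChar, Nat.testBit_zero]
      | succ k =>
        have hk' : k < L := by omega
        have hidx : L + (0 + 1) - 1 - (k + 1) = L - 1 - k := by omega
        rw [hidx, List.getD_append _ _ _ _ (by omega),
          ih (n / 2) (Nat.div_lt_self (by omega) (by omega)) k hk']
        rw [Nat.testBit_add_one]

-- the digit of `zfill(bin(m), w)` read from the right at offset k is bit k of m
theorem pvLayout_getD (m : Nat) (w : Int) (k : Nat)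
    (hk : k < (PySem.Chars.zfill (pvMyBin m) w).length) :
    PySem.List.pyGetD (PySem.Chars.zfill (pvMyBin m) w)
      (((PySem.Chars.zfill (pvMyBin m) w).length : Int) - k - 1) '0'
      = if m.testBit k then '1' else '0' := by
  have hcast : (((PySem.Chars.zfill (pvMyBin m) w).length : Int) - k - 1)
      = (((PySem.Chars.zfill (pvMyBin m) w).length - 1 - k : Nat) : Int) := by
    omega
  rw [hcast, PySem.List.pyGetD_natCast]
  by_cases hw : w ≤ (pvMyBin m).length
  · rw [PySem.Chars.zfill.eq_def, if_pos hw] at hk ⊢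
    exact pvMyBin_getD m k hk
  · rw [PySem.Chars.zfill.eq_def, if_neg hw] at hk ⊢
    obtain ⟨c, rest, hE⟩ : ∃ c rest, pvMyBin m = c :: rest := by
      cases hE : pvMyBin m with
      | nil => exact absurd hE (pvMyBin_ne_nil m)
      | cons a t => exact ⟨a, t, rfl⟩
    have hc : ¬ (c = '+' ∨ c = '-') := by
      rcases pvMyBin_mem m c (by rw [hE]; simp) with h | h <;> simp [h]
    rw [hE] at hk ⊢
    dsimp only at hk ⊢
    rw [if_neg hc] at hk ⊢
    have hlen : (c :: rest).length = (pvMyBin m).length := by rw [hE]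
    set R : Nat := w.toNat - (c :: rest).length with hR
    have hRpos : 0 < R := by
      have hw2 : ((pvMyBin m).length : Int) < w := by omega
      have : (pvMyBin m).length < w.toNat := by omega
      omega
    simp only [List.length_append, List.length_replicate] at hk ⊢
    by_cases hcase : k < (c :: rest).length
    · have hidx : R + (c :: rest).length - 1 - k = R + ((c :: rest).length - 1 - k) := by
        have : 0 < (c :: rest).length := by simp
        omega
      rw [hidx, List.getD_append_right _ _ _ _ (by simp)]
      simp only [List.length_replicate]
      have : R + ((c :: rest).length - 1 - k) - R = (c :: rest).length - 1 - k := by omega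
      rw [this, show (c :: rest) = pvMyBin m from hE.symm]
      exact pvMyBin_getD m k (by omega)
    · have hidx : R + (c :: rest).length - 1 - k < R := by
        have : 0 < (c :: rest).length := by simp
        omega
      rw [List.getD_append _ _ _ _ (by simpa using hidx), List.getD_replicate _ hidx]
      have hbit : m.testBit k = false := by
        apply Nat.testBit_lt_two_pow
        calc m < 2 ^ (pvMyBin m).length := pvMyBin_lt m
          _ ≤ 2 ^ k := Nat.pow_le_pow_right (by omega) (by omega)
      rw [hbit]; simp

-- pvBuild: the string kept by removal-mask m (bit j of m = drop occurrence j), occ counter j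
def pvBuild (sub : String) (m : Nat) : List Char → Nat → List Char
  | [], _ => []
  | c :: t, j =>
    if String.ofList [c] = sub then
      (if m.testBit j then pvBuild sub m t (j + 1) else c :: pvBuild sub m t (j + 1))
    else c :: pvBuild sub m t j

def pvP (sub : String) (c : Char) : Bool := decide (String.ofList [c] = sub)

theorem pvBuild_append (sub : String) (m : Nat) (c : Char) :
    ∀ (s : List Char) (j : Nat), pvBuild sub m (s ++ [c]) j =
      pvBuild sub m s j ++
        (if String.ofList [c] = sub then
          (if m.testBit (j + s.countP (pvP sub)) then [] else [c]) else [c]) := by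
  intro s
  induction s with
  | nil =>
    intro j
    simp only [List.nil_append, pvBuild, List.countP_nil, Nat.add_zero]
    split_ifs <;> simp
  | cons a t ih =>
    intro j
    simp only [List.cons_append, pvBuild, List.countP_cons, pvP]
    by_cases ha : String.ofList [a] = sub
    · rw [if_pos ha, if_pos ha, ih (j + 1)]
      have : j + 1 + t.countP (pvP sub) = j + (t.countP (pvP sub) + 1) := by omega
      rw [this]
      simp only [ha, decide_true]
      split_ifs <;> simp
    · rw [if_neg ha, if_neg ha, ih j]
      simp only [ha, decide_false]
      split_ifs <;> simp_all

theorem pvBuild_congr (sub : String) (m m' : Nat) :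
    ∀ (s : List Char) (j : Nat),
      (∀ i, i < s.countP (pvP sub) → m.testBit (j + i) = m'.testBit (j + i)) →
      pvBuild sub m s j = pvBuild sub m' s j := by
  intro s
  induction s with
  | nil => intro j _; rfl
  | cons a t ih =>
    intro j hbits
    simp only [pvBuild, List.countP_cons, pvP] at hbits ⊢
    by_cases ha : String.ofList [a] = sub
    · simp only [ha, decide_true, if_pos] at hbits ⊢
      have h0 : m.testBit j = m'.testBit j := by
        have := hbits 0 (by omega); simpa using this
      have ht : pvBuild sub m t (j + 1) = pvBuild sub m' t (j + 1) := by
        apply ih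
        intro i hi
        have := hbits (i + 1) (by omega)
        have harr : j + (i + 1) = j + 1 + i := by omega
        rwa [harr] at this
      rw [h0, ht]
    · simp only [ha, decide_false, if_false] at hbits ⊢
      rw [ih j (by simpa using hbits)]

theorem pvBuild_mod (sub : String) (m : Nat) (s : List Char) :
    pvBuild sub m s 0 = pvBuild sub (m % 2 ^ s.countP (pvP sub)) s 0 := by
  apply pvBuild_congr
  intro i hi
  rw [Nat.testBit_mod_two_pow]
  simp [hi]

-- A's inner loop computes pvBuild
theorem pvInnerA (substr : String) (m : Nat) (w : Int) :
    ∀ (t : List Char) (acc : List Char) (j : Nat),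
      j + t.countP (pvP substr) ≤ (PySem.Chars.zfill (pvMyBin m) w).length →
      t.foldl
        (fun (st : List Char × Nat) ci =>
          if String.ofList [ci] = substr then
            (if PySem.List.pyGetD (PySem.Chars.zfill (pvMyBin m) w)
                (((PySem.Chars.zfill (pvMyBin m) w).length : Int) - st.2 - 1) '0' = '1'
             then st.1 else st.1 ++ [ci], st.2 + 1)
          else (st.1 ++ [ci], st.2)) (acc, j)
      = (acc ++ pvBuild substr m t j, j + t.countP (pvP substr)) := by
  intro t
  induction t with
  | nil => intro acc j _; simp [pvBuild]
  | cons a t ih =>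
    intro acc j hle
    simp only [List.countP_cons, pvP] at hle ⊢
    by_cases ha : String.ofList [a] = substr
    · simp only [ha, decide_true, if_true] at hle ⊢
      simp only [List.foldl_cons, if_pos ha]
      rw [pvLayout_getD m w j (by omega)]
      simp only [pvBuild, if_pos ha]
      by_cases hb : m.testBit j
      · rw [hb]
        simp only [reduceIte]
        rw [ih acc (j + 1) (by omega)]
        congr 1
        omega
      · simp only [hb, Bool.false_eq_true, reduceIte]
        rw [if_neg (by simp)]
        rw [ih (acc ++ [a]) (j + 1) (by omega)]
        simp only [List.append_assoc, List.singleton_append]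
        congr 1
        omega
    · simp only [ha, decide_false] at hle ⊢
      simp only [List.foldl_cons, if_neg ha]
      rw [ih (acc ++ [a]) j (by omega)]
      simp only [pvBuild, if_neg ha]
      simp

-- B's fold enumerates all masks
theorem pvFoldB (substr : String) : ∀ (s : List Char),
    s.foldl
      (fun (parts : List (List Char)) c =>
        if String.ofList [c] = substr then parts.map (· ++ [c]) ++ parts
        else parts.map (· ++ [c])) [[]]
    = (List.range (2 ^ s.countP (pvP substr))).map (fun m => pvBuild substr m s 0) := by
  intro s
  induction s using List.reverseRecOn with
  | nil => simp [pvBuild]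
  | append_singleton s c ih =>
    rw [List.foldl_append, List.foldl_cons, List.foldl_nil, ih]
    set K := s.countP (pvP substr) with hK
    by_cases hc : String.ofList [c] = substr
    · rw [if_pos hc]
      have hKc : (s ++ [c]).countP (pvP substr) = K + 1 := by
        simp [List.countP_append, pvP, hc]; omega
      rw [hKc, pow_succ, Nat.mul_two, List.range_add, List.map_append, List.map_map]
      congr 1
      · apply List.map_congr_left
        intro m hm
        simp only [List.mem_range] at hm
        simp only [Function.comp_apply]
        rw [pvBuild_append substr m c s 0, if_pos hc]
        rw [Nat.zero_add, ← hK, Nat.testBit_lt_two_pow hm]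
        simp
      · rw [List.map_map]
        apply List.map_congr_left
        intro m hm
        simp only [List.mem_range] at hm
        simp only [Function.comp_apply]
        rw [pvBuild_append substr (2 ^ K + m) c s 0, if_pos hc]
        rw [Nat.zero_add, ← hK, Nat.testBit_two_pow_add_eq,
          Nat.testBit_lt_two_pow hm]
        simp only [Bool.not_false, reduceIte, List.append_nil]
        apply pvBuild_congr
        intro i hi
        rw [← hK] at hi
        simpa using (Nat.testBit_two_pow_add_gt hi m).symm
    · rw [if_neg hc]
      have hKc : (s ++ [c]).countP (pvP substr) = K := by
        simp [List.countP_append, pvP, hc]; omega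
      rw [hKc, List.map_map]
      apply List.map_congr_left
      intro m hm
      simp only [Function.comp_apply]
      rw [pvBuild_append substr m c s 0, if_neg hc]

theorem pvCountGoSingle (a : Char) :
    ∀ (fuel : Nat) (l : List Char) (acc : Nat), l.length ≤ fuel →
      PySem.Chars.count.go [a] fuel l acc = acc + l.count a := by
  intro fuel
  induction fuel with
  | zero =>
    intro l acc hl
    have : l = [] := by cases l <;> simp_all
    subst this
    rw [PySem.Chars.count.go.eq_def]
    simp
  | succ fuel ih =>
    intro l acc hl
    cases l with
    | nil =>
      rw [PySem.Chars.count.go.eq_def]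
      simp
    | cons h t =>
      rw [PySem.Chars.count.go.eq_def]
      dsimp only
      by_cases hah : a = h
      · subst hah
        rw [if_pos (by simp [List.isPrefixOf])]
        simp only [List.length_singleton, List.drop_one, List.tail_cons]
        rw [ih t (acc + 1) (by simpa using hl)]
        simp
        omega
      · rw [if_neg (by simp [List.isPrefixOf, beq_iff_eq, hah])]
        rw [ih t acc (by simpa using hl)]
        have hne' : ¬ h = a := fun h' => hah h'.symm
        simp [hne']

theorem pvCountSingle (a : Char) (s : List Char) : PySem.Chars.count s [a] = s.count a := by
  rw [PySem.Chars.count]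
  simp only [List.isEmpty_cons, if_false, Bool.false_eq_true]
  exact (pvCountGoSingle a s.length s 0 le_rfl).trans (by omega)

theorem pvSetAbsorb (xs ys : List String) (h : ∀ y ∈ ys, y ∈ xs) :
    PySem.Set.ofList (xs ++ ys) = PySem.Set.ofList xs := by
  induction ys using List.reverseRecOn with
  | nil => simp
  | append_singleton ys y ih =>
    rw [← List.append_assoc, PySem.Set.ofList_append_singleton,
      ih (fun z hz => h z (List.mem_append_left _ hz))]
    have hy : y ∈ PySem.Set.ofList xs := by
      rw [PySem.Set.mem_ofList]
      exact h y (by simp)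
    rw [PySem.Set.add]
    rw [if_pos (by simpa [PySem.Set.contains, List.contains_iff_mem] using hy)]

theorem pvP_iff (substr : String) (a c : Char) (hsub : substr.toList = [a]) :
    (String.ofList [c] = substr) ↔ c = a := by
  constructor
  · intro h
    have := congrArg String.toList h
    rw [String.toList_ofList, hsub] at this
    simpa using this
  · intro h
    subst h
    apply String.toList_inj.mp
    rw [String.toList_ofList, hsub]

theorem pvCountP_single (substr : String) (a : Char) (s : List Char)
    (hsub : substr.toList = [a]) : s.countP (pvP substr) = s.count a := by
  rw [List.count_eq_countP]
  apply List.countP_congr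
  intro c _
  simp [pvP, pvP_iff substr a c hsub]

theorem pvKN (str substr : String) :
    str.toList.countP (pvP substr) ≤ PySem.Str.count str substr := by
  cases hsub : substr.toList with
  | nil =>
    have : str.toList.countP (pvP substr) = 0 := by
      apply List.countP_eq_zero.mpr
      intro c _
      simp only [pvP, decide_eq_true_eq]
      intro h
      have := congrArg String.toList h
      rw [String.toList_ofList, hsub] at this
      simp at this
    omega
  | cons a t =>
    cases t with
    | nil =>
      have h1 : PySem.Str.count str substr = str.toList.count a := by
        show PySem.Chars.count str.toList substr.toList = _
        rw [hsub, pvCountSingle]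
      rw [h1, pvCountP_single substr a str.toList hsub]
    | cons b t2 =>
      have : str.toList.countP (pvP substr) = 0 := by
        apply List.countP_eq_zero.mpr
        intro c _
        simp only [pvP, decide_eq_true_eq]
        intro h
        have := congrArg String.toList h
        rw [String.toList_ofList, hsub] at this
        simp at this
      omega

theorem pvFinal (f : Nat → String) (N K : Nat) (hK : K ≤ N)
    (hper : ∀ m, f m = f (m % 2 ^ K)) :
    PySem.Set.ofList ((List.range (2 ^ N + 1)).map f)
      = PySem.Set.ofList ((List.range (2 ^ K)).map f) := by
  have h2 : 2 ^ K ≤ 2 ^ N + 1 :=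
    le_trans (Nat.pow_le_pow_right (by omega) hK) (by omega)
  rw [show 2 ^ N + 1 = 2 ^ K + (2 ^ N + 1 - 2 ^ K) from by omega, List.range_add,
    List.map_append, List.map_map]
  apply pvSetAbsorb
  intro y hy
  simp only [List.mem_map, List.mem_range, Function.comp_apply] at hy ⊢
  obtain ⟨j, _, rfl⟩ := hy
  exact ⟨(2 ^ K + j) % 2 ^ K, Nat.mod_lt _ (Nat.two_pow_pos K), (hper _).symm⟩

theorem pvBinSlice (k : Nat) :
    PySem.List.slice (PySem.Int.toBinChars0b (k : Int)) (some 2) none = pvMyBin k := by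
  rw [PySem.Int.toBinChars0b, if_neg (by omega)]
  rw [PySem.List.slice_from _ (show (0 : Int) ≤ 2 by omega)]
  simp [pvToDigits_eq]

-- ===== VERDICT (by name: the statement is the Claim_ definition above) =====
theorem removeVariableInAllCombinations_spec : Claim_equal_removeVariableInAllCombinations := by
  unfold Claim_equal_removeVariableInAllCombinations
  intro str substr _hdom
  unfold Spec_removeVariableInAllCombinations
  unfold removeVariableInAllCombinations removeVariableInAllCombinations_alt
  dsimp only
  rw [pvFoldB substr str.toList]
  rw [PySem.List.foldl_append_singleton_eq_map]
  have hcast : (2 : Int) ^ (PySem.Str.count str substr) + 1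
      = ((2 ^ (PySem.Str.count str substr) + 1 : Nat) : Int) := by push_cast; ring
  rw [hcast, PySem.List.pyRange_zero_natCast, List.map_map, List.map_map, List.nil_append]
  have hfold : ∀ (k : Nat),
      ((fun pos : Int => String.ofList
          (str.toList.foldl
            (fun (st : List Char × Nat) ci =>
              if String.ofList [ci] = substr then
                (if PySem.List.pyGetD
                    (PySem.Chars.zfill
                      (PySem.List.slice (PySem.Int.toBinChars0b pos) (some 2) none)
                      (PySem.Str.len str))
                    (((PySem.Chars.zfill
                      (PySem.List.slice (PySem.Int.toBinChars0b pos) (some 2) none)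
                      (PySem.Str.len str)).length : Int) - st.2 - 1) '0' = '1'
                 then st.1 else st.1 ++ [ci], st.2 + 1)
              else (st.1 ++ [ci], st.2))
            ([], 0)).1) ∘ (fun k : Nat => (k : Int))) k
      = String.ofList (pvBuild substr k str.toList 0) := by
    intro k
    simp only [Function.comp_apply, pvBinSlice]
    rw [pvInnerA substr k (PySem.Str.len str) str.toList [] 0
      (by
        rw [PySem.Chars.length_zfill]
        have h1 : str.toList.countP (pvP substr) ≤ str.toList.length :=
          List.countP_le_length
        have h2 : (PySem.Str.len str).toNat = str.toList.length := by
          simp [PySem.Str.len]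
        omega)]
    simp
  rw [show ((fun pos : Int => String.ofList
          (str.toList.foldl
            (fun (st : List Char × Nat) ci =>
              if String.ofList [ci] = substr then
                (if PySem.List.pyGetD
                    (PySem.Chars.zfill
                      (PySem.List.slice (PySem.Int.toBinChars0b pos) (some 2) none)
                      (PySem.Str.len str))
                    (((PySem.Chars.zfill
                      (PySem.List.slice (PySem.Int.toBinChars0b pos) (some 2) none)
                      (PySem.Str.len str)).length : Int) - st.2 - 1) '0' = '1'
                 then st.1 else st.1 ++ [ci], st.2 + 1)
              else (st.1 ++ [ci], st.2))
            ([], 0)).1) ∘ (fun k : Nat => (k : Int)))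
      = (fun k : Nat => String.ofList (pvBuild substr k str.toList 0)) from funext hfold]
  rw [show (String.ofList ∘ fun m : Nat => pvBuild substr m str.toList 0)
      = (fun k : Nat => String.ofList (pvBuild substr k str.toList 0)) from rfl]
  exact pvFinal _ _ _ (pvKN str substr)
    (fun m => congrArg String.ofList (pvBuild_mod substr m str.toList))
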